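-- pv_equiv track=rewrite | github.com/yavor-gornalov/softuni_programming_fundamentals | basic_syntax_conditional_statements_and_loops_exercises/06._string_pureness.py | is_string_pure
-- ===== SOURCE A (Python) =====
-- def is_string_pure(string):
--     is_pure = True
--     pattern = ",._"
--     for ch in pattern:
--         if ch in string:
--             is_pure = False
--             break
--     return is_pure
-- ===== SOURCE B (Python) =====
-- def is_string_pure(string):
--     forbidden = {',', '.', '_'}
--     for ch in string:
--         if ch in forbidden:
--             return False
--     return True
-- ===== Notes on version B (the rewrite author's own statement) =====
-- stated objective: alternative
-- what changed: B scans the input string once with early exit on a forbidden character, instead of A's loop over the pattern with a substring-membership test per pattern character.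
import Mathlib
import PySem

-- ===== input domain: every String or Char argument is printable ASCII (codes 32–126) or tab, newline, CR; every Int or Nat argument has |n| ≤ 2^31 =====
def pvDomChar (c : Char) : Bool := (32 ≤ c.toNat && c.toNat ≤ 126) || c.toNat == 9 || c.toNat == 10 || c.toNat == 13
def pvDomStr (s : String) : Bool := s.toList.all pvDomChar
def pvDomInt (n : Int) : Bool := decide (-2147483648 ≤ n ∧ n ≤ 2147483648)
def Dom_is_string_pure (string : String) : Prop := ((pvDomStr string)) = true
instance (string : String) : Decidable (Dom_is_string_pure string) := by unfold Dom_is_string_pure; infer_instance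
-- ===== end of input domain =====

-- B scans the input once with early exit, instead of A's loop over the pattern testing membership in the string (objective: alternative decomposition).

-- ===== PORT A =====
-- A's loop over the pattern characters, with break on the first hit
def pvALoop (pattern : List Char) (s : List Char) : Bool :=
  match pattern with
  | [] => true
  | ch :: rest => if s.contains ch then false else pvALoop rest s

def is_string_pure (string : String) : Bool :=
  pvALoop [',', '.', '_'] string.toList

-- ===== PORT B =====
-- B's one pass over the input, early return on a forbidden character
def pvBLoop (s : List Char) : Bool :=
  match s with
  | [] => true
  | c :: rest => if [',', '.', '_'].contains c then false else pvBLoop rest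

def is_string_pure_alt (string : String) : Bool :=
  pvBLoop string.toList

-- ===== PRECONDITION & SPEC =====
def Spec_is_string_pure (string : String) (out : Bool) : Prop := out = is_string_pure_alt string
instance (string : String) (out : Bool) : Decidable (Spec_is_string_pure string out) := by unfold Spec_is_string_pure; infer_instance

-- ===== CLAIM (what is proved, stated in full; the proofs are below) =====
def Claim_equal_is_string_pure : Prop := ∀ (string : String), Dom_is_string_pure string → Spec_is_string_pure string (is_string_pure string)

-- ===== LEMMAS AND PROOFS =====
theorem pvBLoop_eq (s : List Char) :
    pvBLoop s = (!(s.contains ',' || s.contains '.' || s.contains '_')) := by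
  induction s with
  | nil => rfl
  | cons c rest ih =>
      simp only [pvBLoop, List.contains_cons, ih]
      by_cases h1 : c = ','
      · simp [h1]
      by_cases h2 : c = '.'
      · simp [h2]
      by_cases h3 : c = '_'
      · simp [h3]
      have e1 : ((',' : Char) == c) = false := beq_eq_false_iff_ne.mpr (Ne.symm h1)
      have e2 : (('.' : Char) == c) = false := beq_eq_false_iff_ne.mpr (Ne.symm h2)
      have e3 : (('_' : Char) == c) = false := beq_eq_false_iff_ne.mpr (Ne.symm h3)
      simp [h1, h2, h3, e1, e2, e3, Bool.and_assoc]

theorem pvALoop_eq (s : List Char) :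
    pvALoop [',', '.', '_'] s = (!(s.contains ',' || s.contains '.' || s.contains '_')) := by
  simp only [pvALoop]
  by_cases h1 : (',' : Char) ∈ s
  · simp [h1]
  by_cases h2 : ('.' : Char) ∈ s
  · simp [h1, h2]
  by_cases h3 : ('_' : Char) ∈ s
  · simp [h1, h2, h3]
  simp [h1, h2, h3]

-- ===== VERDICT (by name: the statement is the Claim_ definition above) =====
theorem is_string_pure_spec : Claim_equal_is_string_pure := by
  intro s _
  unfold Spec_is_string_pure is_string_pure is_string_pure_alt
  rw [pvALoop_eq, pvBLoop_eq]
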